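-- pv_equiv track=rewrite | github.com/biroska/Python-Study | repeticoesEncadeadas/Hipotenusas.py | isHipotenusa
-- ===== SOURCE A (Python) =====
-- def isHipotenusa( hipotenusa ):
--
--     a = b = 1
--
--     while a < hipotenusa:
--
--         while b < hipotenusa:
--
--             if ( a*a + b*b == hipotenusa*hipotenusa ):
--                 return True
--
--             b += 1
--
--         a += 1
--         b = 1
--
--     return False
-- ===== SOURCE B (Python) =====
-- def isHipotenusa(hipotenusa):
--     # Two-pointer scan over a <= b: O(h) instead of A's O(h^2) double loop.
--     a, b = 1, hipotenusa - 1
--     while a <= b: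
--         s = a * a + b * b
--         if s == hipotenusa * hipotenusa:
--             return True
--         if s < hipotenusa * hipotenusa:
--             a += 1
--         else:
--             b -= 1
--     return False
-- ===== Notes on version B (the rewrite author's own statement) =====
-- stated objective: faster
-- what changed: Replaced A's exhaustive double loop over all (a,b) pairs with a single two-pointer scan (a up from 1, b down from h-1) exploiting monotonicity of a^2+b^2.
import Mathlib
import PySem

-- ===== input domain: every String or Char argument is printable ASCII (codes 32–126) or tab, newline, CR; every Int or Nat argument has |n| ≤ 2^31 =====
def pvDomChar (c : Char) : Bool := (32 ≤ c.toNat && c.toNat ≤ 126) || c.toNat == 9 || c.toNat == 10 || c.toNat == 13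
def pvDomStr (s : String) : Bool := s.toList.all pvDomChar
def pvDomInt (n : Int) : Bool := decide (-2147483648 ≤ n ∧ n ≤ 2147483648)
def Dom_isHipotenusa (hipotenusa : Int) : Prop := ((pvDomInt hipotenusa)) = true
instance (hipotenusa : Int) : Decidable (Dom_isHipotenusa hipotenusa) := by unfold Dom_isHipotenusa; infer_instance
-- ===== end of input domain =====

-- B replaces A's exhaustive O(h^2) double loop by a single O(h) two-pointer scan; return values proved equal for all inputs.

-- ===== PORT A =====
-- inner 'while b < hipotenusa' loop of A
def isHipInner (h a b : Int) : Bool :=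
  if b < h then
    if a * a + b * b = h * h then true
    else isHipInner h a (b + 1)
  else false
termination_by (h - b).toNat
decreasing_by omega

-- outer 'while a < hipotenusa' loop of A (b is reset to 1 on each iteration)
def isHipOuter (h a : Int) : Bool :=
  if a < h then
    if isHipInner h a 1 then true
    else isHipOuter h (a + 1)
  else false
termination_by (h - a).toNat
decreasing_by omega

def isHipotenusa (hipotenusa : Int) : Bool := isHipOuter hipotenusa 1

-- ===== PORT B =====
-- two-pointer 'while a <= b' loop of B
def isHipTP (h a b : Int) : Bool :=
  if a ≤ b then
    if a * a + b * b = h * h then true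
    else if a * a + b * b < h * h then isHipTP h (a + 1) b
    else isHipTP h a (b - 1)
  else false
termination_by (b - a + 1).toNat
decreasing_by all_goals omega

def isHipotenusa_alt (hipotenusa : Int) : Bool := isHipTP hipotenusa 1 (hipotenusa - 1)

-- ===== PRECONDITION & SPEC =====
def Spec_isHipotenusa (hipotenusa : Int) (out : Bool) : Prop := out = isHipotenusa_alt hipotenusa
instance (hipotenusa : Int) (out : Bool) : Decidable (Spec_isHipotenusa hipotenusa out) := by unfold Spec_isHipotenusa; infer_instance

-- ===== CLAIM (what is proved, stated in full; the proofs are below) =====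
def Claim_equal_isHipotenusa : Prop := ∀ (hipotenusa : Int), Dom_isHipotenusa hipotenusa → Spec_isHipotenusa hipotenusa (isHipotenusa hipotenusa)

-- ===== LEMMAS AND PROOFS =====

-- A's inner loop finds some b in [b0, h) with a^2 + b^2 = h^2
theorem isHipInner_iff (h a b : Int) :
    isHipInner h a b = true ↔ ∃ c : Int, b ≤ c ∧ c < h ∧ a * a + c * c = h * h := by
  induction b using isHipInner.induct h a with
  | case1 b hb hhit =>
      rw [isHipInner, if_pos hb, if_pos hhit]
      exact ⟨fun _ => ⟨b, le_refl b, hb, hhit⟩, fun _ => rfl⟩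
  | case2 b hb hmiss ih =>
      rw [isHipInner, if_pos hb, if_neg hmiss, ih]
      constructor
      · rintro ⟨c, h1, h2, h3⟩; exact ⟨c, by omega, h2, h3⟩
      · rintro ⟨c, h1, h2, h3⟩
        refine ⟨c, ?_, h2, h3⟩
        rcases eq_or_lt_of_le h1 with rfl | hlt
        · exact absurd h3 hmiss
        · omega
  | case3 b hb =>
      rw [isHipInner, if_neg hb]
      simp only [Bool.false_eq_true, false_iff]
      rintro ⟨c, h1, h2, _⟩; omega

-- A's outer loop finds a pair (x, y), x in [a, h), y in [1, h)
theorem isHipOuter_iff (h a : Int) :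
    isHipOuter h a = true ↔
      ∃ x y : Int, a ≤ x ∧ x < h ∧ 1 ≤ y ∧ y < h ∧ x * x + y * y = h * h := by
  induction a using isHipOuter.induct h with
  | case1 a ha hin =>
      rw [isHipOuter, if_pos ha, if_pos hin]
      rw [isHipInner_iff] at hin
      obtain ⟨c, h1, h2, h3⟩ := hin
      exact ⟨fun _ => ⟨a, c, le_refl a, ha, h1, h2, h3⟩, fun _ => rfl⟩
  | case2 a ha hin ih =>
      rw [isHipOuter, if_pos ha, if_neg hin, ih]
      constructor
      · rintro ⟨x, y, h1, h2, h3, h4, h5⟩; exact ⟨x, y, by omega, h2, h3, h4, h5⟩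
      · rintro ⟨x, y, h1, h2, h3, h4, h5⟩
        refine ⟨x, y, ?_, h2, h3, h4, h5⟩
        rcases eq_or_lt_of_le h1 with rfl | hlt
        · exact absurd ((isHipInner_iff h a 1).mpr ⟨y, h3, h4, h5⟩) hin
        · omega
  | case3 a ha =>
      rw [isHipOuter, if_neg ha]
      simp only [Bool.false_eq_true, false_iff]
      rintro ⟨x, y, h1, h2, _⟩; omega

-- B's two-pointer loop finds an ordered pair x ≤ y within [a, b], given 1 ≤ a
theorem isHipTP_iff (h : Int) : ∀ a b : Int, 1 ≤ a →
    (isHipTP h a b = true ↔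
      ∃ x y : Int, a ≤ x ∧ x ≤ y ∧ y ≤ b ∧ x * x + y * y = h * h) := by
  intro a b
  induction a, b using isHipTP.induct h with
  | case1 a b hab hhit =>
      intro _
      rw [isHipTP, if_pos hab, if_pos hhit]
      exact ⟨fun _ => ⟨a, b, le_refl a, hab, le_refl b, hhit⟩, fun _ => rfl⟩
  | case2 a b hab hmiss hlt ih =>
      intro ha
      rw [isHipTP, if_pos hab, if_neg hmiss, if_pos hlt, ih (by omega)]
      constructor
      · rintro ⟨x, y, h1, h2, h3, h4⟩; exact ⟨x, y, by omega, h2, h3, h4⟩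
      · rintro ⟨x, y, h1, h2, h3, h4⟩
        refine ⟨x, y, ?_, h2, h3, h4⟩
        rcases eq_or_lt_of_le h1 with rfl | hgt
        · -- a solution with x = a contradicts a^2 + b^2 < h^2 since y ≤ b
          exfalso
          have hy2 : y * y ≤ b * b := by nlinarith
          nlinarith
        · omega
  | case3 a b hab hmiss hge ih =>
      intro ha
      rw [isHipTP, if_pos hab, if_neg hmiss, if_neg hge, ih ha]
      constructor
      · rintro ⟨x, y, h1, h2, h3, h4⟩; exact ⟨x, y, h1, h2, by omega, h4⟩
      · rintro ⟨x, y, h1, h2, h3, h4⟩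
        refine ⟨x, y, h1, h2, ?_, h4⟩
        rcases eq_or_lt_of_le h3 with rfl | hlt
        · -- a solution with y = b contradicts a^2 + b^2 > h^2 since a ≤ x
          exfalso
          have hx2 : a * a ≤ x * x := by nlinarith
          exact hmiss (le_antisymm (by linarith) (by linarith))
        · omega
  | case4 a b hab =>
      intro _
      rw [isHipTP, if_neg hab]
      simp only [Bool.false_eq_true, false_iff]
      rintro ⟨x, y, h1, h2, h3, _⟩; omega

-- ===== VERDICT (by name: the statement is the Claim_ definition above) =====
theorem isHipotenusa_spec : Claim_equal_isHipotenusa := by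
  intro h _
  unfold Spec_isHipotenusa isHipotenusa isHipotenusa_alt
  rw [Bool.eq_iff_iff, isHipOuter_iff, isHipTP_iff h 1 (h - 1) le_rfl]
  constructor
  · rintro ⟨x, y, h1, h2, h3, h4, h5⟩
    rcases le_total x y with hxy | hyx
    · exact ⟨x, y, h1, hxy, by omega, h5⟩
    · exact ⟨y, x, h3, hyx, by omega, by linarith [h5]⟩
  · rintro ⟨x, y, h1, h2, h3, h4⟩
    exact ⟨x, y, h1, by omega, by omega, by omega, h4⟩
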